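-- pv_equiv track=rewrite | github.com/ZhaoYilin/moha | moha/posthf/ci/ci_basis_set.py | apply_annihilation_creation
-- ===== SOURCE A (Python) =====
-- import copy
--
-- def apply_annihilation_creation(reference, ac):
--     """Apply annihilation and creation to the self Slater determinant.
--
--     Parameters
--     ----------
--     ac : dict
--         A dictionary of annihilation and creation.
--
--     Raises
--     ------
--     TypeError
--         If ac is not a dictionary.
--
--     Returns
--     -------
--     configuraiton : dict
--         New configuration for the self Slater determinant.
--     """
--     if not isinstance(ac,list):
--         raise TypeError("Parameter ac must be list.")
--     configuration = copy.deepcopy(reference)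
--
--     for i in ac[0]:
--         configuration[i] -= 1
--     for i in ac[1]:
--         configuration[i] += 1
--     return configuration
-- ===== SOURCE B (Python) =====
-- def apply_annihilation_creation(reference, ac):
--     """Rebuild the configuration by counting: every touched orbital is looked
--     up in the reference and its occurrences in ac[0]/ac[1] are counted."""
--     if not isinstance(ac, list):
--         raise TypeError("Parameter ac must be list.")
--     ann, cre = ac[0], ac[1]
--     return {i: reference[i] - ann.count(i) + cre.count(i)
--             for i in dict.fromkeys(list(reference) + ann + cre)}
-- ===== Notes on version B (the rewrite author's own statement) =====
-- stated objective: alternative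
-- what changed: B rebuilds the configuration in one comprehension over the ordered set of touched orbitals (dict.fromkeys), computing each value as reference[i] minus/plus its occurrence counts in ac[0]/ac[1], instead of A's deep copy mutated in place once per operator occurrence; it trades A's O(n+m) updates for count scans.
import Mathlib
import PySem

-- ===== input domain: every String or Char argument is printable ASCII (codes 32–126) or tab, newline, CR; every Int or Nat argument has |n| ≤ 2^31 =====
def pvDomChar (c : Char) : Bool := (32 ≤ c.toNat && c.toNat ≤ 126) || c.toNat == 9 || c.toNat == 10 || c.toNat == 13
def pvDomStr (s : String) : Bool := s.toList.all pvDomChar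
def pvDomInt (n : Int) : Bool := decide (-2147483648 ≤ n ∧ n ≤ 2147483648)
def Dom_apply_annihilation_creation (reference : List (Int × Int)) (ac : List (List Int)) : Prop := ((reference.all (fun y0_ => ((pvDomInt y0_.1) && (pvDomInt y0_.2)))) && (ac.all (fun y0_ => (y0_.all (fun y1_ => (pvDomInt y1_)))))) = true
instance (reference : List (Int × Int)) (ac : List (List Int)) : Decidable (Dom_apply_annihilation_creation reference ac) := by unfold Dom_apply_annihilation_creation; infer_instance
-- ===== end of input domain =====

-- B rebuilds the dict in one comprehension over the touched orbitals from occurrence counts,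
-- instead of A's deep copy mutated once per operator occurrence (simpler decomposition).

-- Python `configuration[i] += d` on a dict-as-assoc-list: adjust the value at the
-- first (for a real dict: unique) matching key; exact when the key is present
-- (an absent key is a Python KeyError, excluded by Pre_).
def pvDictAdd (c : List (Int × Int)) (i : Int) (d : Int) : List (Int × Int) :=
  match c with
  | [] => []
  | (k, v) :: t => if k = i then (k, v + d) :: t else (k, v) :: pvDictAdd t i d

-- ===== PORT A =====
def apply_annihilation_creation (reference : List (Int × Int)) (ac : List (List Int)) : List (Int × Int) :=
  -- isinstance(ac, list) is always true at this type; ac[0]/ac[1] raise IndexError when missing (excluded by Pre_)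
  let conf := (ac.getD 0 []).foldl (fun c i => pvDictAdd c i (-1)) reference
  (ac.getD 1 []).foldl (fun c i => pvDictAdd c i 1) conf

-- ===== PORT B =====
-- dict.fromkeys(list(reference) + ann + cre) is PySem.List.dedup; reference[i] is exact via getD
-- wherever the key exists — a missing key is a Python KeyError, excluded by Pre_.
def apply_annihilation_creation_alt (reference : List (Int × Int)) (ac : List (List Int)) : List (Int × Int) :=
  let ann := ac.getD 0 []
  let cre := ac.getD 1 []
  (PySem.List.dedup (reference.map Prod.fst ++ ann ++ cre)).map
    (fun i => (i, (PySem.Dict.mk reference).getD i 0 - (ann.count i : Int) + (cre.count i : Int)))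

-- ===== PRECONDITION & SPEC =====
-- Pre_ excludes exactly the inputs where Python A raises — len(ac) < 2 (IndexError on
-- ac[0]/ac[1]) or an annihilation/creation index absent from the reference (KeyError) —
-- plus assoc lists with duplicate keys, which do not represent any Python dict.
def Pre_apply_annihilation_creation (reference : List (Int × Int)) (ac : List (List Int)) : Prop :=
  2 ≤ ac.length ∧ (reference.map Prod.fst).Nodup ∧
    ∀ i ∈ ac.getD 0 [] ++ ac.getD 1 [], i ∈ reference.map Prod.fst
instance (reference : List (Int × Int)) (ac : List (List Int)) : Decidable (Pre_apply_annihilation_creation reference ac) := by unfold Pre_apply_annihilation_creation; infer_instance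

def pvWitness_apply_annihilation_creation : (List (Int × Int)) × List (List Int) :=
  ([(0, 2), (1, 0)], [[0], [1]])

def Spec_apply_annihilation_creation (reference : List (Int × Int)) (ac : List (List Int)) (out : List (Int × Int)) : Prop := out = apply_annihilation_creation_alt reference ac
instance (reference : List (Int × Int)) (ac : List (List Int)) (out : List (Int × Int)) : Decidable (Spec_apply_annihilation_creation reference ac out) := by unfold Spec_apply_annihilation_creation; infer_instance

-- ===== CLAIM (what is proved, stated in full; the proofs are below) =====
def Claim_equal_apply_annihilation_creation : Prop := ∀ (reference : List (Int × Int)) (ac : List (List Int)), Dom_apply_annihilation_creation reference ac → Pre_apply_annihilation_creation reference ac → Spec_apply_annihilation_creation reference ac (apply_annihilation_creation reference ac)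

-- ===== LEMMAS AND PROOFS =====

-- canonical form: add f k to the FIRST occurrence of each key k of c
def pvApplyAll : List (Int × Int) → (Int → Int) → List (Int × Int)
  | [], _ => []
  | (k, v) :: t, f => (k, v + f k) :: pvApplyAll t (fun x => if x = k then 0 else f x)

lemma pvApplyAll_congr (c : List (Int × Int)) (f g : Int → Int) (h : ∀ x, f x = g x) :
    pvApplyAll c f = pvApplyAll c g := by
  induction c generalizing f g with
  | nil => rfl
  | cons p t ih =>
    obtain ⟨k, v⟩ := p
    simp only [pvApplyAll, h k]
    refine congrArg _ (ih _ _ ?_)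
    intro x; by_cases hx : x = k <;> simp [hx, h x]

lemma pvApplyAll_zero (c : List (Int × Int)) (f : Int → Int) (h : ∀ x, f x = 0) :
    pvApplyAll c f = c := by
  induction c generalizing f with
  | nil => rfl
  | cons p t ih =>
    obtain ⟨k, v⟩ := p
    simp only [pvApplyAll, h k, add_zero]
    refine congrArg _ (ih _ ?_)
    intro x; by_cases hx : x = k <;> simp [hx, h x]

lemma pvDictAdd_applyAll (c : List (Int × Int)) (f : Int → Int) (i d : Int) :
    pvDictAdd (pvApplyAll c f) i d = pvApplyAll c (fun x => f x + if x = i then d else 0) := by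
  induction c generalizing f with
  | nil => rfl
  | cons p t ih =>
    obtain ⟨k, v⟩ := p
    simp only [pvApplyAll, pvDictAdd]
    by_cases hk : k = i
    · subst hk
      rw [if_pos rfl]
      refine congrArg₂ List.cons (by simp; ring) (pvApplyAll_congr _ _ _ ?_)
      intro x; by_cases hx : x = k <;> simp [hx]
    · rw [if_neg hk, ih]
      refine congrArg₂ List.cons (by simp [hk]) (pvApplyAll_congr _ _ _ ?_)
      intro x; by_cases hx : x = k
      · subst hx; simp [hk]
      · simp [hx]

-- A's loop shape: one pass adding the constant d at every occurrence
lemma pvFoldConst (l : List Int) (c : List (Int × Int)) (f : Int → Int) (d : Int) :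
    l.foldl (fun c i => pvDictAdd c i d) (pvApplyAll c f)
      = pvApplyAll c (fun x => f x + d * l.count x) := by
  induction l generalizing f with
  | nil =>
    simp only [List.foldl_nil]
    exact pvApplyAll_congr _ _ _ (by intro x; simp)
  | cons i t ih =>
    simp only [List.foldl_cons, pvDictAdd_applyAll, ih]
    refine pvApplyAll_congr _ _ _ ?_
    intro x
    rw [List.count_cons]
    push_cast
    by_cases hx : i = x
    · simp only [hx, beq_self_eq_true, if_true]; ring
    · rw [if_neg (fun h => hx h.symm)]
      simp only [beq_eq_false_iff_ne.mpr hx, Bool.false_eq_true, if_false]; ring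

-- with distinct keys, the first-occurrence form is a plain map
lemma pvApplyAll_nodup (c : List (Int × Int)) (f : Int → Int)
    (h : (c.map Prod.fst).Nodup) :
    pvApplyAll c f = c.map (fun p => (p.1, p.2 + f p.1)) := by
  induction c generalizing f with
  | nil => rfl
  | cons p t ih =>
    obtain ⟨k, v⟩ := p
    simp only [List.map_cons, List.nodup_cons] at h
    simp only [pvApplyAll, List.map_cons]
    rw [ih _ h.2]
    refine congrArg _ (List.map_congr_left ?_)
    intro q hq
    have hne : q.1 ≠ k := fun he => h.1 (he ▸ List.mem_map_of_mem hq)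
    simp [hne]

-- Set.update adds nothing when every new element is already present
lemma pvUpdate_subset (s : List Int) (l : List Int) (h : ∀ i ∈ l, i ∈ s) :
    PySem.Set.update s l = s := by
  rw [PySem.Set.update_eq_append_filter]
  have : (PySem.Set.ofList l).filter (fun y => !(PySem.Set.contains s y)) = [] := by
    rw [List.filter_eq_nil_iff]
    intro a ha
    have : a ∈ s := h a ((PySem.Set.mem_ofList l a).mp ha)
    simp [PySem.Set.contains_eq_listContains, this]
  rw [this, List.append_nil]

-- ===== VERDICT (by name: the statement is the Claim_ definition above) =====
theorem apply_annihilation_creation_spec : Claim_equal_apply_annihilation_creation := by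
  unfold Claim_equal_apply_annihilation_creation
  intro reference ac _ hpre
  unfold Spec_apply_annihilation_creation
  unfold apply_annihilation_creation apply_annihilation_creation_alt
  obtain ⟨-, hnodup, hmem⟩ := hpre
  have hann : ∀ i ∈ ac.getD 0 [], i ∈ reference.map Prod.fst := by
    intro i hi; exact hmem i (List.mem_append.mpr (Or.inl hi))
  have hcre : ∀ i ∈ ac.getD 1 [], i ∈ reference.map Prod.fst := by
    intro i hi; exact hmem i (List.mem_append.mpr (Or.inr hi))
  have hdedup : PySem.List.dedup (reference.map Prod.fst ++ ac.getD 0 [] ++ ac.getD 1 [])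
      = reference.map Prod.fst := by
    rw [PySem.List.dedup_eq_ofList, PySem.Set.ofList_append, PySem.Set.ofList_append,
        PySem.Set.ofList_eq_self_of_nodup _ hnodup, pvUpdate_subset _ _ hann,
        pvUpdate_subset _ _ hcre]
  have hr : pvApplyAll reference (fun _ => 0) = reference :=
    pvApplyAll_zero _ _ (fun _ => rfl)
  calc (ac.getD 1 []).foldl (fun c i => pvDictAdd c i 1)
        ((ac.getD 0 []).foldl (fun c i => pvDictAdd c i (-1)) reference)
      = (ac.getD 1 []).foldl (fun c i => pvDictAdd c i 1)
        ((ac.getD 0 []).foldl (fun c i => pvDictAdd c i (-1))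
          (pvApplyAll reference (fun _ => 0))) := by rw [hr]
    _ = pvApplyAll reference
          (fun x => (0 + (-1) * (ac.getD 0 []).count x) + 1 * (ac.getD 1 []).count x) := by
          rw [pvFoldConst, pvFoldConst]
    _ = reference.map (fun p =>
          (p.1, p.2 - ((ac.getD 0 []).count p.1 : Int) + ((ac.getD 1 []).count p.1 : Int))) := by
          rw [pvApplyAll_nodup _ _ hnodup]
          refine List.map_congr_left ?_
          intro q _
          simp only [Prod.mk.injEq, true_and]
          ring
    _ = (reference.map Prod.fst).map (fun i =>
          (i, (PySem.Dict.mk reference).getD i 0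
                - ((ac.getD 0 []).count i : Int) + ((ac.getD 1 []).count i : Int))) := by
          rw [List.map_map]
          refine List.map_congr_left ?_
          intro q hq
          have hitems : (q.1, q.2) ∈ (PySem.Dict.mk reference).items := by
            simpa [PySem.Dict.items] using hq
          have hkeys : (PySem.Dict.mk reference).keys.Nodup := by
            simpa [PySem.Dict.keys_mk] using hnodup
          have := PySem.Dict.getD_of_mem_items (PySem.Dict.mk reference) hitems hkeys 0
          simp [Function.comp, this]
    _ = (PySem.List.dedup (reference.map Prod.fst ++ ac.getD 0 [] ++ ac.getD 1 [])).map
          (fun i => (i, (PySem.Dict.mk reference).getD i 0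
                - ((ac.getD 0 []).count i : Int) + ((ac.getD 1 []).count i : Int))) := by
          rw [hdedup]
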